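-- pv_equiv track=rewrite | github.com/lixx5578/lixx5578 | hw08.py | zoom
-- ===== SOURCE A (Python) =====
-- import copy
--
-- def zoom(img_matrix):
--     '''
--     Purpose:
--       Zooms in on the upper left quadrant of the image, by taking each pixel
--       in that quadrant and expanding it to four pixels in the output image.
--     Input Parameter(s):
--       (see invert)
--     Return Value:
--       A 3D matrix of the same dimensions, where each pixel in the upper left
--       quadrant in the original is a 2x2 square of duplicate pixels in the
--       returned matrix.
--     '''
--     height = len(img_matrix)
--     width = len(img_matrix[0])
--     new_matrix = copy.deepcopy(img_matrix)
--     for y in range(int(height/2)):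
--         for x in range(int(width/2)):
--           new_matrix[y*2][x*2]=img_matrix[y][x]
--           new_matrix[y*2+1][x*2]=img_matrix[y][x]
--           new_matrix[y*2][x*2+1]=img_matrix[y][x]
--           new_matrix[y*2+1][x*2+1]=img_matrix[y][x]
--     return new_matrix
-- ===== SOURCE B (Python) =====
-- import copy
--
-- def zoom(img_matrix):
--     # Single gather pass over the output grid instead of deepcopy-then-scatter:
--     # zoomed region pixels come from img_matrix[Y//2][X//2], the rest are deep copies.
--     H2 = 2 * (len(img_matrix) // 2)
--     W2 = 2 * (len(img_matrix[0]) // 2)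
--     return [[img_matrix[Y // 2][X // 2] if Y < H2 and X < W2
--              else copy.deepcopy(img_matrix[Y][X])
--              for X in range(len(img_matrix[Y]))]
--             for Y in range(len(img_matrix))]
-- ===== Notes on version B (the rewrite author's own statement) =====
-- stated objective: simpler
-- what changed: Replaces A's deepcopy-then-scatter (four in-place writes per upper-left-quadrant pixel) with a single gather pass that computes every output pixel directly from its source coordinate.
import Mathlib
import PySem

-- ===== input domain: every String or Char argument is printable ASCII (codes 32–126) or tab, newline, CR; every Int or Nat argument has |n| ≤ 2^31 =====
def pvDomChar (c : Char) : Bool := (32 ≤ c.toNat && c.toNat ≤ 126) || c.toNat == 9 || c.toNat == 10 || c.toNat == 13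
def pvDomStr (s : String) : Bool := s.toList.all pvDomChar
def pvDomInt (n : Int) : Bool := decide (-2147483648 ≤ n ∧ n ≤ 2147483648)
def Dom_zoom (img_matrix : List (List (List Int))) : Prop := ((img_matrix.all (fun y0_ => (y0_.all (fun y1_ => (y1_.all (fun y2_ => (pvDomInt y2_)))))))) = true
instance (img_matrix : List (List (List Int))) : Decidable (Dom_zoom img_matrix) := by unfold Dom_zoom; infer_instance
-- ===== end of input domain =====

-- B replaces A's deepcopy-then-scatter (four in-place writes per upper-left-quadrant pixel) by a
-- single gather pass building every output pixel directly (objective: simpler decomposition).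
-- Equivalence is about the returned VALUE; Python-level aliasing inside the result is not modelled.

-- matrix write m[i][j] = v (indices are in range on every input Pre_ admits)
def pvSetAt (m : List (List (List Int))) (i j : Nat) (v : List Int) : List (List (List Int)) :=
  m.set i ((m.getD i []).set j v)

-- matrix read m[i][j]
def pvGet2 (m : List (List (List Int))) (i j : Nat) : List Int :=
  (m.getD i []).getD j []

-- ===== PORT A =====
-- int(height/2) on a nonnegative Python int is division by 2 rounded down, i.e. Nat division.
def zoom (img_matrix : List (List (List Int))) : List (List (List Int)) :=
  let height := img_matrix.length
  let width := (img_matrix.headD []).length     -- img_matrix[0]; Pre_ excludes []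
  (List.range (height / 2)).foldl (fun nm y =>
    (List.range (width / 2)).foldl (fun nm x =>
      let px := pvGet2 img_matrix y x
      pvSetAt (pvSetAt (pvSetAt (pvSetAt nm (y*2) (x*2) px)
        (y*2+1) (x*2) px) (y*2) (x*2+1) px) (y*2+1) (x*2+1) px) nm) img_matrix

-- ===== PORT B =====
def zoom_alt (img_matrix : List (List (List Int))) : List (List (List Int)) :=
  let H2 := 2 * (img_matrix.length / 2)
  let W2 := 2 * ((img_matrix.headD []).length / 2)
  (List.range img_matrix.length).map (fun Y =>
    (List.range ((img_matrix.getD Y []).length)).map (fun X =>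
      if Y < H2 ∧ X < W2 then pvGet2 img_matrix (Y / 2) (X / 2)
      else pvGet2 img_matrix Y X))

-- ===== PRECONDITION & SPEC =====
-- Pre_zoom holds exactly when the Python A returns normally: the matrix is nonempty (A reads
-- img_matrix[0]) and, for every source row y of the zoom loop, row y is long enough for A's reads
-- and rows 2y and 2y+1 are long enough for A's four writes (otherwise A raises IndexError).
def Pre_zoom (img_matrix : List (List (List Int))) : Prop :=
  img_matrix ≠ [] ∧ ∀ y, y < img_matrix.length / 2 →
    (img_matrix.headD []).length / 2 ≤ (img_matrix.getD y []).length ∧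
    2 * ((img_matrix.headD []).length / 2) ≤ (img_matrix.getD (y*2) []).length ∧
    2 * ((img_matrix.headD []).length / 2) ≤ (img_matrix.getD (y*2+1) []).length
instance (img_matrix : List (List (List Int))) : Decidable (Pre_zoom img_matrix) := by
  unfold Pre_zoom; infer_instance
def pvWitness_zoom : List (List (List Int)) := [[[1], [2]], [[3], [4]]]

def Spec_zoom (img_matrix : List (List (List Int))) (out : List (List (List Int))) : Prop := out = zoom_alt img_matrix
instance (img_matrix : List (List (List Int))) (out : List (List (List Int))) : Decidable (Spec_zoom img_matrix out) := by unfold Spec_zoom; infer_instance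

-- ===== CLAIM (what is proved, stated in full; the proofs are below) =====
def Claim_equal_zoom : Prop := ∀ (img_matrix : List (List (List Int))), Dom_zoom img_matrix → Pre_zoom img_matrix → Spec_zoom img_matrix (zoom img_matrix)

-- ===== LEMMAS AND PROOFS =====

-- A's two loops, named so the invariant proofs can speak about partial iteration counts.
def pvInner (img : List (List (List Int))) (y : Nat) (m : List (List (List Int))) (k : Nat) :
    List (List (List Int)) :=
  (List.range k).foldl (fun nm x =>
    let px := pvGet2 img y x
    pvSetAt (pvSetAt (pvSetAt (pvSetAt nm (y*2) (x*2) px)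
      (y*2+1) (x*2) px) (y*2) (x*2+1) px) (y*2+1) (x*2+1) px) m

def pvOuter (img : List (List (List Int))) (m : List (List (List Int))) (k : Nat) :
    List (List (List Int)) :=
  (List.range k).foldl (fun nm y => pvInner img y nm ((img.headD []).length / 2)) m

theorem zoom_eq_pvOuter (img : List (List (List Int))) :
    zoom img = pvOuter img img (img.length / 2) := rfl

theorem pv_getD_set {α : Type} (m : List α) (i k : Nat) (r d : α) :
    (m.set i r).getD k d = if i = k ∧ i < m.length then r else m.getD k d := by
  rcases eq_or_ne i k with h | h
  · subst h
    rcases Nat.lt_or_ge i m.length with hl | hl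
    · simp [List.getD_eq_getElem?_getD, hl]
    · rw [List.set_eq_of_length_le hl, if_neg (by omega)]
  · simp [List.getD_eq_getElem?_getD, h]

theorem len_pvSetAt (m : List (List (List Int))) (i j : Nat) (v : List Int) :
    (pvSetAt m i j v).length = m.length := by simp [pvSetAt]

theorem rowlen_pvSetAt (m : List (List (List Int))) (i j : Nat) (v : List Int) (k : Nat) :
    ((pvSetAt m i j v).getD k []).length = (m.getD k []).length := by
  unfold pvSetAt
  rw [pv_getD_set]
  split_ifs with h
  · obtain ⟨h1, _⟩ := h; subst h1; simp
  · rfl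

theorem get2_pvSetAt (m : List (List (List Int))) (i j : Nat) (v : List Int) (k l : Nat) :
    pvGet2 (pvSetAt m i j v) k l =
      if i = k ∧ i < m.length ∧ j = l ∧ j < (m.getD i []).length then v
      else pvGet2 m k l := by
  unfold pvGet2 pvSetAt
  rw [pv_getD_set]
  by_cases h : i = k ∧ i < m.length
  · rw [if_pos h]
    obtain ⟨h1, h2⟩ := h; subst h1
    rw [pv_getD_set]
    by_cases h' : j = l ∧ j < (m.getD i []).length
    · rw [if_pos h', if_pos ⟨rfl, h2, h'⟩]
    · rw [if_neg h', if_neg (by tauto)]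
  · rw [if_neg h, if_neg (by tauto)]

theorem inner_spec (img : List (List (List Int))) (y : Nat)
    (hy : y*2+1 < img.length) :
    ∀ (k : Nat) (m : List (List (List Int))),
      2*k ≤ (img.getD (y*2) []).length → 2*k ≤ (img.getD (y*2+1) []).length →
      m.length = img.length →
      (∀ t, (m.getD t []).length = (img.getD t []).length) →
      (pvInner img y m k).length = img.length ∧
      (∀ t, ((pvInner img y m k).getD t []).length = (img.getD t []).length) ∧
      (∀ i j, pvGet2 (pvInner img y m k) i j =
        if (i = y*2 ∨ i = y*2+1) ∧ j < 2*k then pvGet2 img y (j/2) else pvGet2 m i j) := by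
  intro k
  induction k with
  | zero =>
    intro m _ _ h1 h2
    refine ⟨h1, h2, ?_⟩
    intro i j
    simp [pvInner]
  | succ k ih =>
    intro m hb1 hb2 h1 h2
    obtain ⟨L1, L2, L3⟩ := ih m (by omega) (by omega) h1 h2
    have e : pvInner img y m (k+1) =
        (let px := pvGet2 img y k
         pvSetAt (pvSetAt (pvSetAt (pvSetAt (pvInner img y m k) (y*2) (k*2) px)
           (y*2+1) (k*2) px) (y*2) (k*2+1) px) (y*2+1) (k*2+1) px) := by
      simp [pvInner, List.range_succ]
    have hy2 : y*2 < img.length := by omega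
    refine ⟨?_, ?_, ?_⟩
    · rw [e]; simp only [len_pvSetAt]; exact L1
    · intro t; rw [e]; simp only [rowlen_pvSetAt]; exact L2 t
    · intro i j
      rw [e]
      simp only [get2_pvSetAt, len_pvSetAt, rowlen_pvSetAt, L1, L2]
      by_cases hij : (i = y*2 ∨ i = y*2+1) ∧ j < 2*(k+1)
      · rw [if_pos hij]
        obtain ⟨hi, hj⟩ := hij
        by_cases hjk : j < 2*k
        · rw [if_neg (by omega), if_neg (by omega), if_neg (by omega), if_neg (by omega),
            L3, if_pos ⟨hi, hjk⟩]
        · have hdiv : j/2 = k := by omega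
          rw [hdiv]
          have hj2 : j = k*2 ∨ j = k*2+1 := by omega
          rcases hi with hi | hi <;> rcases hj2 with hj2 | hj2 <;>
            (split_ifs with a b c d <;> first | rfl | (exfalso; omega))
      · rw [if_neg hij]
        split_ifs with a b c d <;> first | (exfalso; omega) | skip
        rw [L3, if_neg (by omega)]

theorem outer_spec (img : List (List (List Int))) :
    ∀ (k : Nat) (m : List (List (List Int))), 2*k ≤ img.length →
      (∀ y, y < k →
        2 * ((img.headD []).length / 2) ≤ (img.getD (y*2) []).length ∧
        2 * ((img.headD []).length / 2) ≤ (img.getD (y*2+1) []).length) →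
      m.length = img.length →
      (∀ t, (m.getD t []).length = (img.getD t []).length) →
      (pvOuter img m k).length = img.length ∧
      (∀ t, ((pvOuter img m k).getD t []).length = (img.getD t []).length) ∧
      (∀ i j, pvGet2 (pvOuter img m k) i j =
        if i < 2*k ∧ j < 2*((img.headD []).length / 2) then pvGet2 img (i/2) (j/2)
        else pvGet2 m i j) := by
  intro k
  induction k with
  | zero =>
    intro m _ _ h1 h2
    refine ⟨h1, h2, ?_⟩
    intro i j
    simp [pvOuter]
  | succ k ih =>
    intro m hk hb h1 h2
    obtain ⟨L1, L2, L3⟩ := ih m (by omega) (fun y hy => hb y (by omega)) h1 h2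
    have e : pvOuter img m (k+1) =
        pvInner img k (pvOuter img m k) ((img.headD []).length / 2) := by
      simp [pvOuter, List.range_succ]
    have hy : k*2+1 < img.length := by omega
    obtain ⟨B1, B2⟩ := hb k (by omega)
    obtain ⟨I1, I2, I3⟩ := inner_spec img k hy ((img.headD []).length / 2)
      (pvOuter img m k) B1 B2 L1 L2
    refine ⟨by rw [e]; exact I1, by intro t; rw [e]; exact I2 t, ?_⟩
    intro i j
    rw [e, I3 i j]
    by_cases h : i < 2*(k+1) ∧ j < 2*((img.headD []).length / 2)
    · rw [if_pos h]
      by_cases hik : i < 2*k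
      · rw [if_neg (by omega), L3, if_pos ⟨hik, h.2⟩]
      · have hi2 : i = k*2 ∨ i = k*2+1 := by omega
        have hdiv : i/2 = k := by omega
        rw [if_pos ⟨hi2, h.2⟩, hdiv]
    · rw [if_neg h, if_neg (by omega), L3, if_neg (by omega)]

theorem pv_getD_map_range {α : Type} (f : Nat → α) (n k : Nat) (d : α) :
    ((List.range n).map f).getD k d = if k < n then f k else d := by
  rcases Nat.lt_or_ge k n with h | h
  · simp [List.getD_eq_getElem?_getD, h]
  · rw [List.getD_eq_default, if_neg (by omega)]
    simp [h]

theorem pv_getD_oob {α : Type} (m : List α) (k : Nat) (d : α) (h : m.length ≤ k) :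
    m.getD k d = d := by
  rw [List.getD_eq_default]
  omega

theorem alt_len (img : List (List (List Int))) : (zoom_alt img).length = img.length := by
  simp [zoom_alt]

theorem alt_rowlen (img : List (List (List Int))) (t : Nat) :
    ((zoom_alt img).getD t []).length = (img.getD t []).length := by
  unfold zoom_alt
  rw [pv_getD_map_range]
  split_ifs with h
  · simp
  · rw [pv_getD_oob _ _ _ (by omega)]

theorem alt_get2 (img : List (List (List Int))) (i j : Nat) :
    pvGet2 (zoom_alt img) i j =
      if i < img.length ∧ j < (img.getD i []).length then
        (if i < 2*(img.length / 2) ∧ j < 2*((img.headD []).length / 2) then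
          pvGet2 img (i/2) (j/2)
        else pvGet2 img i j)
      else pvGet2 img i j := by
  show ((zoom_alt img).getD i []).getD j [] = _
  simp only [zoom_alt]
  rw [pv_getD_map_range]
  by_cases h1 : i < img.length
  · rw [if_pos h1, pv_getD_map_range]
    by_cases h2 : j < (img.getD i []).length
    · rw [if_pos h2, if_pos (show i < img.length ∧ j < (img.getD i []).length from ⟨h1, h2⟩)]
    · rw [if_neg h2, if_neg (show ¬(i < img.length ∧ j < (img.getD i []).length) from by tauto)]
      show ([] : List Int) = pvGet2 img i j
      unfold pvGet2
      rw [List.getD_eq_default _ _ (by omega)]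
  · rw [if_neg h1, if_neg (show ¬(i < img.length ∧ j < (img.getD i []).length) from by tauto)]
    show (([] : List (List Int)).getD j []) = pvGet2 img i j
    unfold pvGet2
    rw [pv_getD_oob img i [] (by omega)]

theorem mat_ext (a b : List (List (List Int)))
    (h1 : a.length = b.length)
    (h2 : ∀ t, (a.getD t []).length = (b.getD t []).length)
    (h3 : ∀ i j, pvGet2 a i j = pvGet2 b i j) : a = b := by
  apply List.ext_getElem h1
  intro i hia hib
  have hr : a[i].length = b[i].length := by
    have := h2 i
    rwa [List.getD_eq_getElem a [] hia, List.getD_eq_getElem b [] hib] at this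
  apply List.ext_getElem hr
  intro j hja hjb
  have := h3 i j
  unfold pvGet2 at this
  rwa [List.getD_eq_getElem a [] hia, List.getD_eq_getElem b [] hib,
    List.getD_eq_getElem _ [] hja, List.getD_eq_getElem _ [] hjb] at this

-- ===== VERDICT (by name: the statement is the Claim_ definition above) =====
theorem zoom_spec : Claim_equal_zoom := by
  intro img _ hpre
  obtain ⟨-, hPre⟩ := hpre
  obtain ⟨O1, O2, O3⟩ := outer_spec img (img.length / 2) img (by omega)
    (fun y hy => ⟨(hPre y hy).2.1, (hPre y hy).2.2⟩) rfl (fun _ => rfl)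
  unfold Spec_zoom
  rw [zoom_eq_pvOuter]
  apply mat_ext
  · rw [O1, alt_len]
  · intro t
    rw [O2 t, alt_rowlen]
  · intro i j
    rw [O3 i j, alt_get2]
    by_cases h : i < 2*(img.length / 2) ∧ j < 2*((img.headD []).length / 2)
    · rw [if_pos h]
      have hi : i < img.length := by omega
      obtain ⟨-, b1, b2⟩ := hPre (i/2) (by omega)
      have hj : j < (img.getD i []).length := by
        have hi2 : i = i/2*2 ∨ i = i/2*2+1 := by omega
        rcases hi2 with h' | h' <;> rw [h'] <;> omega
      rw [if_pos (show i < img.length ∧ j < (img.getD i []).length from ⟨hi, hj⟩)]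
    · rw [if_neg h]
      split_ifs <;> rfl
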